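-- pv_equiv track=rewrite | github.com/MP-30/dsa_march25 | leetcode/strings/11_434_Number_of_Segments_in_a_String.py | continues
-- ===== SOURCE A (Python) =====
-- def continues(s):
--     base_count = 0
--     if len(s)>0:
--         if ' ' not in s:
--             return (base_count +1)
--         if s[0] != ' ':
--             base_count +=1
--         for i in range(1,len(s)):
--             if s[i] != ' ' and s[i-1] == ' ':
--                 base_count +=1
--         return base_count
--     else:
--         return base_count
-- ===== SOURCE B (Python) =====
-- def continues(s):
--     return len([w for w in s.split(' ') if w])
-- ===== Notes on version B (the rewrite author's own statement) =====
-- stated objective: idiomatic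
-- what changed: B materializes the single-space-split token list and counts the non-empty tokens, replacing A's character-by-character space-to-nonspace transition scan with its first-character and no-space special cases.
import Mathlib
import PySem

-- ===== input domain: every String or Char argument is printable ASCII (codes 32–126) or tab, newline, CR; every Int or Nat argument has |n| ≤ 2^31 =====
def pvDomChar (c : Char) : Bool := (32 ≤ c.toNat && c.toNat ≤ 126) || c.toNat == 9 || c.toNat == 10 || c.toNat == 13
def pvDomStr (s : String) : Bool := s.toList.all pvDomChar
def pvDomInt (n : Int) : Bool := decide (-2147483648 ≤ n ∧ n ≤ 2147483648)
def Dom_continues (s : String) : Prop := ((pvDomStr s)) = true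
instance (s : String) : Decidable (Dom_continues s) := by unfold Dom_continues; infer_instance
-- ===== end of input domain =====

-- B counts the non-empty tokens of the single-space split instead of A's character-by-character
-- space→non-space transition scan with its first-character and no-space special cases. (objective: idiomatic)

-- ===== PORT A =====
def continues (s : String) : Int :=
  let base_count : Int := 0
  if PySem.Str.len s > 0 then
    if PySem.Str.isIn " " s = false then
      base_count + 1
    else
      let base_count := if PySem.Str.pyGet? s 0 ≠ some ' ' then base_count + 1 else base_count
      (PySem.List.pyRange 1 (PySem.Str.len s) 1).foldl
        (fun b i =>
          if PySem.Str.pyGet? s i ≠ some ' ' ∧ PySem.Str.pyGet? s (i - 1) = some ' ' then b + 1 else b)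
        base_count
  else
    base_count

-- ===== PORT B =====
def continues_alt (s : String) : Int :=
  (((PySem.Chars.splitOn s.toList [' ']).filter (fun w => w ≠ [])).length : Int)

-- ===== PRECONDITION & SPEC =====
def Spec_continues (s : String) (out : Int) : Prop := out = continues_alt s
instance (s : String) (out : Int) : Decidable (Spec_continues s out) := by unfold Spec_continues; infer_instance

-- ===== CLAIM (what is proved, stated in full; the proofs are below) =====
def Claim_equal_continues : Prop := ∀ (s : String), Dom_continues s → Spec_continues s (continues s)

-- ===== LEMMAS AND PROOFS =====

def tokA : List Char → List Char → List (List Char)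
  | [], cur => [cur.reverse]
  | c :: r, cur => if c = ' ' then cur.reverse :: tokA r [] else tokA r (c :: cur)

lemma go_spec : ∀ (fuel : Nat) (l cur : List Char) (acc : List (List Char)), l.length ≤ fuel →
    PySem.Chars.splitOn.go [' '] fuel l cur acc = acc.reverse ++ tokA l cur := by
  intro fuel
  induction fuel with
  | zero =>
    intro l cur acc h
    have : l = [] := List.eq_nil_of_length_eq_zero (Nat.le_zero.mp h)
    subst this
    simp [PySem.Chars.splitOn.go, tokA]
  | succ n ih =>
    intro l cur acc h
    cases l with
    | nil => simp [PySem.Chars.splitOn.go, tokA]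
    | cons c rest =>
      by_cases hc : c = ' '
      · subst hc
        rw [PySem.Chars.splitOn.go]
        simp only [List.isPrefixOf, BEq.rfl, Bool.true_and, if_pos, List.length_cons,
          List.length_nil, List.drop_succ_cons, List.drop_zero]
        rw [ih rest [] (cur.reverse :: acc) (by simpa using Nat.lt_succ_iff.mp (by simpa using h))]
        simp [tokA]
      · rw [PySem.Chars.splitOn.go]
        have hp : [' '].isPrefixOf (c :: rest) = false := by
          simp [List.isPrefixOf]
          exact fun h' => hc h'.symm
        rw [hp]
        simp only [Bool.false_eq_true, if_false]
        rw [ih rest (c :: cur) acc (by simpa using Nat.lt_succ_iff.mp (by simpa using h))]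
        simp [tokA, hc]
def gSeg : Bool → List Char → Nat
  | _, [] => 0
  | inside, c :: r => if c = ' ' then gSeg false r else (if inside then 0 else 1) + gSeg true r
def transC : List Char → Nat
  | a :: b :: r => (if b ≠ ' ' ∧ a = ' ' then 1 else 0) + transC (b :: r)
  | _ => 0

lemma count_tokA : ∀ (l cur : List Char),
    ((tokA l cur).filter (fun w => w ≠ [])).length
      = (if cur = [] then 0 else 1) + gSeg (decide (cur ≠ [])) l := by
  intro l
  induction l with
  | nil =>
    intro cur
    rcases cur with _ | ⟨c, cs⟩ <;> simp [tokA, gSeg]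
  | cons c r ih =>
    intro cur
    by_cases hc : c = ' '
    · subst hc
      have h0 := ih []
      simp only [decide_not] at h0
      rcases cur with _ | ⟨d, ds⟩ <;> simp [tokA, gSeg, h0] <;> omega
    · rw [tokA]
      rw [if_neg hc, ih (c :: cur)]
      rcases cur with _ | ⟨d, ds⟩ <;> simp [gSeg, hc]

lemma trans_g : ∀ (r : List Char) (a : Char), transC (a :: r) = gSeg (decide (a ≠ ' ')) r := by
  intro r
  induction r with
  | nil => intro a; simp [transC, gSeg]
  | cons b r' ih =>
    intro a
    rw [transC, ih b]
    by_cases hb : b = ' ' <;> by_cases ha : a = ' ' <;> simp [gSeg, hb, ha]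

lemma gSeg_true_no_space : ∀ (r : List Char), ' ' ∉ r → gSeg true r = 0 := by
  intro r
  induction r with
  | nil => intro; rfl
  | cons c r' ih =>
    intro h
    have hc : c ≠ ' ' := fun e => h (e ▸ List.mem_cons_self ..)
    simp [gSeg, hc, ih (fun m => h (List.mem_cons_of_mem _ m))]

lemma transC_short (l : List Char) (h : l.length ≤ 1) : transC l = 0 := by
  rcases l with _ | ⟨a, _ | ⟨b, r⟩⟩ <;> simp_all [transC]
lemma foldA (cs : List Char) : ∀ (d j : Nat), 1 ≤ j → j ≤ cs.length → cs.length - j = d →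
    ∀ b : Int,
    (PySem.List.pyRange (j : Int) (cs.length : Int) 1).foldl
      (fun b i =>
        if PySem.List.pyGet? cs i ≠ some ' ' ∧ PySem.List.pyGet? cs (i - 1) = some ' ' then b + 1 else b)
      b = b + (transC (cs.drop (j - 1)) : Int) := by
  intro d
  induction d with
  | zero =>
    intro j h1 h2 hd b
    have hj : j = cs.length := by omega
    subst hj
    have hr : PySem.List.pyRange ((cs.length : Int)) ((cs.length : Int)) 1 = [] := by
      simp [PySem.List.pyRange]
    rw [hr]
    have : transC (cs.drop (cs.length - 1)) = 0 := by
      apply transC_short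
      simp [List.length_drop]; omega
    simp [this]
  | succ d ih =>
    intro j h1 h2 hd b
    have hlt : j < cs.length := by omega
    rw [PySem.List.pyRange_one_cons (by exact_mod_cast hlt)]
    rw [List.foldl_cons]
    have hcast : ((j : Int) + 1) = ((j + 1 : Nat) : Int) := by push_cast; ring
    rw [hcast, ih (j+1) (by omega) (by omega) (by omega)]
    have hget : PySem.List.pyGet? cs (j : Int) = some cs[j] := by
      rw [PySem.List.pyGet?_natCast]; simp [List.getElem?_eq_getElem hlt]
    have hcast2 : ((j : Int) - 1) = ((j - 1 : Nat) : Int) := by omega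
    have hget2 : PySem.List.pyGet? cs ((j : Int) - 1) = some cs[j-1] := by
      rw [hcast2, PySem.List.pyGet?_natCast]
      simp [List.getElem?_eq_getElem (show j - 1 < cs.length by omega)]
    have hj1 : j - 1 + 1 = j := by omega
    have hdrop1 : cs.drop (j - 1) = cs[j-1] :: cs.drop j := by
      rw [List.drop_eq_getElem_cons (show j - 1 < cs.length by omega), hj1]
    have hdrop2 : cs.drop j = cs[j] :: cs.drop (j+1) := by
      rw [List.drop_eq_getElem_cons hlt]
    have hdrop2' : cs.drop j = cs[j] :: cs.drop (1 + j) := by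
      rw [Nat.add_comm]; exact hdrop2
    rw [hdrop1, hdrop2, transC]
    simp only [hget, hget2, Nat.add_sub_cancel]
    by_cases hc : cs[j] ≠ ' ' ∧ cs[j-1] = ' '
    · rw [if_pos (by simp [hc.1, hc.2]), if_pos hc, hdrop2']
      push_cast; ring
    · rw [if_neg (by simpa using hc), if_neg hc, hdrop2']
      push_cast; ring
lemma isIn_space (cs : List Char) : PySem.Chars.isIn [' '] cs = true ↔ ' ' ∈ cs := by
  have h := PySem.Chars.findFrom_natCast_eq_neg_one_iff cs [' '] 0 (by simp)
  rw [Nat.cast_zero, PySem.Chars.findFrom_zero] at h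
  simp only [List.drop_zero, List.singleton_infix_iff] at h
  unfold PySem.Chars.isIn
  rw [bne_iff_ne]
  constructor
  · intro hne; by_contra hm; exact hne (h.mpr hm)
  · intro hm hne; exact (h.mp hne) hm

lemma alt_eq (s : String) : continues_alt s = (gSeg false s.toList : Int) := by
  unfold continues_alt PySem.Chars.splitOn
  rw [go_spec _ _ _ _ (by omega)]
  simp only [List.reverse_nil, List.nil_append]
  rw [count_tokA]
  simp

lemma main_chars (cs : List Char) :
    (if ((cs.length : Int)) > 0 then
      if PySem.Chars.isIn [' '] cs = false then (0 : Int) + 1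
      else
        (PySem.List.pyRange 1 (cs.length : Int) 1).foldl
          (fun b i =>
            if PySem.List.pyGet? cs i ≠ some ' ' ∧ PySem.List.pyGet? cs (i - 1) = some ' ' then b + 1
            else b)
          (if PySem.List.pyGet? cs 0 ≠ some ' ' then (0 : Int) + 1 else 0)
    else 0) = (gSeg false cs : Int) := by
  cases cs with
  | nil => simp [gSeg]
  | cons a r =>
    rw [if_pos (by exact_mod_cast Nat.succ_pos r.length)]
    by_cases hsp : ' ' ∈ a :: r
    · rw [if_neg (by simp [(isIn_space (a :: r)).mpr hsp])]
      have hget0 : PySem.List.pyGet? (a :: r) ((0 : Nat) : Int) = some a := by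
        rw [PySem.List.pyGet?_natCast]; rfl
      rw [Nat.cast_zero] at hget0
      have hfold := foldA (a :: r) ((a :: r).length - 1) 1 (by simp) (by simp) rfl
        (if PySem.List.pyGet? (a :: r) 0 ≠ some ' ' then (0 : Int) + 1 else 0)
      rw [Nat.cast_one] at hfold
      rw [hfold]
      simp only [Nat.sub_self, List.drop_zero, hget0]
      rw [trans_g r a]
      by_cases ha : a = ' ' <;> simp [gSeg, ha] <;> push_cast <;> ring
    · rw [if_pos (by simp [show PySem.Chars.isIn [' '] (a :: r) ≠ true from
        fun h => hsp ((isIn_space (a :: r)).mp h)])]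
      have ha : a ≠ ' ' := fun e => hsp (e ▸ List.mem_cons_self ..)
      have hr : ' ' ∉ r := fun m => hsp (List.mem_cons_of_mem _ m)
      simp [gSeg, ha, gSeg_true_no_space r hr]

-- ===== VERDICT (by name: the statement is the Claim_ definition above) =====
theorem continues_spec : Claim_equal_continues := by
  intro s _
  unfold Spec_continues
  rw [alt_eq]
  exact main_chars s.toList
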